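-- pv_equiv track=rewrite | github.com/aqara-docs/portal | pages/02_Obsidian_파일 검색기.py | find_context_lines
-- ===== SOURCE A (Python) =====
-- def find_context_lines(content, search_term, context_lines=2):
--     """검색어가 포함된 라인과 그 주변 컨텍스트를 찾습니다."""
--     if not search_term:
--         return content
--
--     lines = content.split('\n')
--     result_lines = []
--     found_locations = []
--
--     for i, line in enumerate(lines):
--         if search_term.lower() in line.lower():
--             start = max(0, i - context_lines)
--             end = min(len(lines), i + context_lines + 1)
--             found_locations.append((start, end, i))
--
--     # 중복 제거 및 연속된 범위 병합
--     if found_locations: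
--         found_locations.sort()
--         merged_locations = [found_locations[0]]
--
--         for start, end, match_line in found_locations[1:]:
--             prev_start, prev_end, _ = merged_locations[-1]
--             if start <= prev_end:
--                 merged_locations[-1] = (prev_start, max(end, prev_end), match_line)
--             else:
--                 merged_locations.append((start, end, match_line))
--
--         # 결과 조합
--         for start, end, match_line in merged_locations:
--             if result_lines:
--                 result_lines.append('...')
--
--             section = lines[start:end]
--             result_lines.extend(section)
--
--         return '\n'.join(result_lines)
--
--     return content
-- ===== SOURCE B (Python) =====
-- def find_context_lines(content, search_term, context_lines=2):
--     """Keep-set re-implementation: mark every index within context of a match, then scan once."""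
--     if not search_term:
--         return content
--     lines = content.split('\n')
--     term = search_term.lower()
--     keep = set()
--     for i, line in enumerate(lines):
--         if term in line.lower():
--             keep.update(range(max(0, i - context_lines), min(len(lines), i + context_lines + 1)))
--     if not keep:
--         return content
--     out = []
--     prev = None
--     for i in sorted(keep):
--         if prev is not None and i != prev + 1:
--             out.append('...')
--         out.append(lines[i])
--         prev = i
--     return '\n'.join(out)
-- ===== Notes on version B (the rewrite author's own statement) =====
-- stated objective: simpler
-- what changed: Replaces A's build-sort-merge of (start,end,match) interval triples and slice concatenation by a keep-set of line indices marked around each match, rendered in one sorted scan that inserts '...' at each index gap; Pre_ excludes the inputs with a negative context_lines and a matching line, where Python's negative-slice-end wraparound makes A return an accidental value ('' or an unrelated middle window of lines) that B, which naturally returns the content unchanged there, cannot be expected to match.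
-- outside the precondition, e.g. on find_context_lines('a\nb', 'a', -1): A returns '', B returns 'a\nb'; on find_context_lines('a\nb\nc\nd\ne\nf', 'a', -2): A returns 'c\nd\ne', B returns 'a\nb\nc\nd\ne\nf'
import Mathlib
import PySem

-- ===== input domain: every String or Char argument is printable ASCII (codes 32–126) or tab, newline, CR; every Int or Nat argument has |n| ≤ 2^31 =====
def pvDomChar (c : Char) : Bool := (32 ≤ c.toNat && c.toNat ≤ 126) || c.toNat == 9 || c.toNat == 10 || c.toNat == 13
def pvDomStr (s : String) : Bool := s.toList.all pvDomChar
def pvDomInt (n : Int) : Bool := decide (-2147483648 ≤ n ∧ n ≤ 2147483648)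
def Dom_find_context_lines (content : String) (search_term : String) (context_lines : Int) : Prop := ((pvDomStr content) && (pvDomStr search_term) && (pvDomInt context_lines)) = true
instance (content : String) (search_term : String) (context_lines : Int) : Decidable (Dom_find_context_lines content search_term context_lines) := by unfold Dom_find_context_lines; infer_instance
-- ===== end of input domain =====

-- B replaces A's interval build/sort/merge by a keep-set of line indices rendered in one scan (objective: simpler).

-- ===== PORT A =====
def find_context_lines (content : String) (search_term : String) (context_lines : Int) : String :=
  if search_term = "" then content else
  let lines := (PySem.Str.split? content "\n").getD []  -- split? is some: sep "\n" ≠ ""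
  let found : List (Int × Int × Int) :=
    (PySem.List.enumerate lines 0).foldl (fun acc p =>
      if PySem.Str.isIn (PySem.Str.lower search_term) (PySem.Str.lower p.2) then
        acc ++ [(max 0 (p.1 - context_lines), min (PySem.List.len lines) (p.1 + context_lines + 1), p.1)]
      else acc) []
  if found ≠ [] then
    -- sort key: `found` is built with start, end and match index all nondecreasing, so this
    -- stable sort by start returns the same list as Python's full-tuple sort on every input
    let sortedLocs := PySem.List.sorted found (fun t => t.1) false
    let merged := (PySem.List.slice sortedLocs (some 1) none).foldl (fun ms t =>
        let prev := PySem.List.pyGetD ms (-1) (0, 0, 0)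
        if t.1 ≤ prev.2.1 then
          PySem.List.pySetD ms (-1) (prev.1, max t.2.1 prev.2.1, t.2.2)
        else ms ++ [t]) [PySem.List.pyGetD sortedLocs 0 (0, 0, 0)]
    let result_lines := merged.foldl (fun rl t =>
        (if rl ≠ [] then rl ++ ["..."] else rl) ++ PySem.List.slice lines (some t.1) (some t.2.1)) []
    PySem.Str.join "\n" result_lines
  else content

-- ===== PORT B =====
def find_context_lines_alt (content : String) (search_term : String) (context_lines : Int) : String :=
  if search_term = "" then content else
  let lines := (PySem.Str.split? content "\n").getD []  -- split? is some: sep "\n" ≠ ""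
  let term := PySem.Str.lower search_term
  let keep : PySem.Set Int :=
    (PySem.List.enumerate lines 0).foldl (fun s p =>
      if PySem.Str.isIn term (PySem.Str.lower p.2) then
        PySem.Set.update s (PySem.List.pyRange (max 0 (p.1 - context_lines))
          (min (PySem.List.len lines) (p.1 + context_lines + 1)) 1)
      else s) PySem.Set.empty
  if keep = [] then content else
  let scan := (PySem.List.sorted keep (fun x => x) false).foldl (fun st i =>
      let out := match st.2 with
        | some p => if i ≠ p + 1 then st.1 ++ ["..."] else st.1
        | none => st.1
      (out ++ [PySem.List.pyGetD lines i ""], some i)) (([] : List String), (none : Option Int))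
  PySem.Str.join "\n" scan.1

-- ===== PRECONDITION & SPEC =====
-- Pre_ excludes exactly the inputs with a negative context_lines and a matching line: there
-- Python's negative slice ends in lines[start:end] wrap around and A returns an accidental value
-- ("" or an unrelated middle window of lines), while B naturally returns the content unchanged.
def Pre_find_context_lines (content : String) (search_term : String) (context_lines : Int) : Prop :=
  0 ≤ context_lines ∨ search_term = "" ∨
    ∀ line ∈ (PySem.Str.split? content "\n").getD [],
      PySem.Str.isIn (PySem.Str.lower search_term) (PySem.Str.lower line) = false
instance (content : String) (search_term : String) (context_lines : Int) : Decidable (Pre_find_context_lines content search_term context_lines) := by unfold Pre_find_context_lines; infer_instance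

def pvWitness_find_context_lines : String × String × Int := ("a\nb\nc", "b", 1)

def Spec_find_context_lines (content : String) (search_term : String) (context_lines : Int) (out : String) : Prop := out = find_context_lines_alt content search_term context_lines
instance (content : String) (search_term : String) (context_lines : Int) (out : String) : Decidable (Spec_find_context_lines content search_term context_lines out) := by unfold Spec_find_context_lines; infer_instance

-- ===== CLAIM (what is proved, stated in full; the proofs are below) =====
def Claim_equal_find_context_lines : Prop := ∀ (content : String) (search_term : String) (context_lines : Int), Dom_find_context_lines content search_term context_lines → Pre_find_context_lines content search_term context_lines → Spec_find_context_lines content search_term context_lines (find_context_lines content search_term context_lines)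

-- ===== LEMMAS AND PROOFS =====


-- proof-only helpers: the merge/render/scan step functions (definitionally the port lambdas),
-- the interval grouping pvIvGo that the merge loop computes, and the index range of an interval
def pvRng (iv : Int × Int) : List Int := PySem.List.pyRange iv.1 iv.2 1

def pvIvGo (n cl : Int) : Int → Int → List Int → List (Int × Int)
  | s, lm, [] => [(s, min n (lm + cl + 1))]
  | s, lm, m :: ms =>
    if max 0 (m - cl) ≤ min n (lm + cl + 1) then pvIvGo n cl s m ms
    else (s, min n (lm + cl + 1)) :: pvIvGo n cl (max 0 (m - cl)) m ms

def pvMergeStep : List (Int × Int × Int) → (Int × Int × Int) → List (Int × Int × Int) := fun ms t =>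
  let prev := PySem.List.pyGetD ms (-1) (0, 0, 0)
  if t.1 ≤ prev.2.1 then
    PySem.List.pySetD ms (-1) (prev.1, max t.2.1 prev.2.1, t.2.2)
  else ms ++ [t]

def pvRenderIv (lines : List String) : List String → (Int × Int) → List String := fun rl iv =>
  (if rl ≠ [] then rl ++ ["..."] else rl) ++ PySem.List.slice lines (some iv.1) (some iv.2)

def pvScanStep (lines : List String) : (List String × Option Int) → Int → (List String × Option Int) :=
  fun st i =>
    let out := match st.2 with
      | some p => if i ≠ p + 1 then st.1 ++ ["..."] else st.1
      | none => st.1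
    (out ++ [PySem.List.pyGetD lines i ""], some i)

theorem pvSetLast {α : Type} (xs : List α) (x v : α) :
    PySem.List.pySetD (xs ++ [x]) (-1) v = xs ++ [v] := by
  simp [PySem.List.pySetD, PySem.List.pySet?, PySem.List.pyIdx?]

theorem pvMerge_proj (n cl : Int) (rest : List Int) : ∀ (pre : List (Int × Int × Int)) (s lm j : Int),
    List.Pairwise (· < ·) (lm :: rest) →
    ((rest.map (fun m => (max 0 (m - cl), min n (m + cl + 1), m))).foldl pvMergeStep
        (pre ++ [(s, min n (lm + cl + 1), j)])).map (fun t => (t.1, t.2.1))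
      = pre.map (fun t => (t.1, t.2.1)) ++ pvIvGo n cl s lm rest := by
  induction rest with
  | nil => intro pre s lm j _; simp [pvIvGo]
  | cons m rest ih =>
    intro pre s lm j hpw
    have hlm : lm < m := (List.pairwise_cons.mp hpw).1 m (by simp)
    have hpw' : List.Pairwise (· < ·) (m :: rest) := (List.pairwise_cons.mp hpw).2
    have hstep : pvMergeStep (pre ++ [(s, min n (lm + cl + 1), j)]) (max 0 (m - cl), min n (m + cl + 1), m)
        = if max 0 (m - cl) ≤ min n (lm + cl + 1)
          then pre ++ [(s, min n (m + cl + 1), m)]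
          else (pre ++ [(s, min n (lm + cl + 1), j)]) ++ [(max 0 (m - cl), min n (m + cl + 1), m)] := by
      simp only [pvMergeStep, PySem.List.pyGetD_neg_one_append_singleton]
      by_cases hc : max 0 (m - cl) ≤ min n (lm + cl + 1)
      · rw [if_pos hc, if_pos hc, pvSetLast]
        have hmax : max (min n (m + cl + 1)) (min n (lm + cl + 1)) = min n (m + cl + 1) := by omega
        rw [hmax]
      · rw [if_neg hc, if_neg hc]
    simp only [List.map_cons, List.foldl_cons, hstep]
    by_cases hc : max 0 (m - cl) ≤ min n (lm + cl + 1)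
    · rw [if_pos hc, ih pre s m m hpw']
      simp only [pvIvGo]
      rw [if_pos hc]
    · rw [if_neg hc, ih _ (max 0 (m - cl)) m m hpw']
      simp only [pvIvGo]
      rw [if_neg hc]
      simp

theorem pvIvGo_head (n cl : Int) (ms : List Int) : ∀ s lm, ∃ e tl,
    pvIvGo n cl s lm ms = (s, e) :: tl := by
  induction ms with
  | nil => intro s lm; exact ⟨_, _, rfl⟩
  | cons m ms ih =>
    intro s lm
    simp only [pvIvGo]
    split
    · exact ih s m
    · exact ⟨_, _, rfl⟩

theorem pvIvGo_bounds (n cl : Int) (ms : List Int) : ∀ s lm, 0 ≤ cl → 0 ≤ s → s ≤ lm → lm < n →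
    List.Pairwise (· < ·) (lm :: ms) → (∀ m ∈ ms, m < n) →
    ∀ iv ∈ pvIvGo n cl s lm ms, 0 ≤ iv.1 ∧ iv.1 < iv.2 ∧ iv.2 ≤ n := by
  induction ms with
  | nil =>
    intro s lm hcl h0 hslm hlmn _ _ iv hiv
    simp only [pvIvGo, List.mem_singleton] at hiv
    subst hiv
    simp only
    omega
  | cons m ms ih =>
    intro s lm hcl h0 hslm hlmn hpw hb iv hiv
    have hlm : lm < m := (List.pairwise_cons.mp hpw).1 m (by simp)
    have hpw' := (List.pairwise_cons.mp hpw).2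
    have hmn : m < n := hb m (by simp)
    have hb' : ∀ x ∈ ms, x < n := fun x hx => hb x (by simp [hx])
    simp only [pvIvGo] at hiv
    split at hiv
    · exact ih s m hcl h0 (by omega) hmn hpw' hb' iv hiv
    · rcases List.mem_cons.mp hiv with h | h
      · subst h
        simp only
        omega
      · exact ih (max 0 (m - cl)) m hcl (by omega) (by omega) hmn hpw' hb' iv h

theorem pvIvGo_chain (n cl : Int) (ms : List Int) : ∀ s lm,
    List.IsChain (fun a b => a.2 < b.1) (pvIvGo n cl s lm ms) := by
  induction ms with
  | nil => intro s lm; simp [pvIvGo]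
  | cons m ms ih =>
    intro s lm
    simp only [pvIvGo]
    split
    · exact ih s m
    · rename_i hc
      refine (ih _ m).cons ?_
      intro y hy
      obtain ⟨e', tl, heq⟩ := pvIvGo_head n cl ms (max 0 (m - cl)) m
      rw [heq] at hy
      simp only [List.head?_cons, Option.mem_def, Option.some.injEq] at hy
      subst hy
      simp only
      omega

theorem pvIvGo_mem (n cl : Int) (ms : List Int) : ∀ s lm (i : Int), 0 ≤ cl → 0 ≤ s → s ≤ lm → lm < n →
    List.Pairwise (· < ·) (lm :: ms) → (∀ m ∈ ms, m < n) → (∀ m ∈ ms, s ≤ max 0 (m - cl)) →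
    ((∃ iv ∈ pvIvGo n cl s lm ms, iv.1 ≤ i ∧ i < iv.2) ↔
      ((s ≤ i ∧ i < min n (lm + cl + 1)) ∨ ∃ m ∈ ms, max 0 (m - cl) ≤ i ∧ i < min n (m + cl + 1))) := by
  induction ms with
  | nil =>
    intro s lm i hcl h0 hslm hlmn _ _ _
    simp [pvIvGo]
  | cons m ms ih =>
    intro s lm i hcl h0 hslm hlmn hpw hb hS
    have hlm : lm < m := (List.pairwise_cons.mp hpw).1 m (by simp)
    have hpw' := (List.pairwise_cons.mp hpw).2
    have hmn : m < n := hb m (by simp)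
    have hb' : ∀ x ∈ ms, x < n := fun x hx => hb x (by simp [hx])
    have hsm : s ≤ max 0 (m - cl) := hS m (by simp)
    simp only [pvIvGo]
    split
    · rename_i hc
      rw [ih s m i hcl h0 (by omega) hmn hpw' hb'
        (fun x hx => by have := (List.pairwise_cons.mp hpw').1 x hx; omega)]
      constructor
      · rintro (⟨h1, h2⟩ | ⟨m', hm', h1, h2⟩)
        · by_cases hi : i < min n (lm + cl + 1)
          · exact Or.inl ⟨h1, hi⟩
          · exact Or.inr ⟨m, by simp, by omega, by omega⟩
        · exact Or.inr ⟨m', by simp [hm'], h1, h2⟩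
      · rintro (⟨h1, h2⟩ | ⟨m', hm', h1, h2⟩)
        · exact Or.inl ⟨h1, by omega⟩
        · rcases List.mem_cons.mp hm' with rfl | hm''
          · exact Or.inl ⟨by omega, by omega⟩
          · exact Or.inr ⟨m', hm'', h1, h2⟩
    · rename_i hc
      rw [show (∃ iv ∈ (s, min n (lm + cl + 1)) :: pvIvGo n cl (max 0 (m - cl)) m ms, iv.1 ≤ i ∧ i < iv.2)
          ↔ ((s ≤ i ∧ i < min n (lm + cl + 1)) ∨ ∃ iv ∈ pvIvGo n cl (max 0 (m - cl)) m ms, iv.1 ≤ i ∧ i < iv.2) from by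
        constructor
        · rintro ⟨iv, hiv, h1, h2⟩
          rcases List.mem_cons.mp hiv with rfl | hiv'
          · exact Or.inl ⟨h1, h2⟩
          · exact Or.inr ⟨iv, hiv', h1, h2⟩
        · rintro (⟨h1, h2⟩ | ⟨iv, hiv, h1, h2⟩)
          · exact ⟨(s, min n (lm + cl + 1)), by simp, h1, h2⟩
          · exact ⟨iv, by simp [hiv], h1, h2⟩]
      rw [ih (max 0 (m - cl)) m i hcl (by omega) (by omega) hmn hpw' hb'
        (fun x hx => by have := (List.pairwise_cons.mp hpw').1 x hx; omega)]
      constructor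
      · rintro (⟨h1, h2⟩ | (⟨h1, h2⟩ | ⟨m', hm', h1, h2⟩))
        · exact Or.inl ⟨h1, h2⟩
        · exact Or.inr ⟨m, by simp, h1, h2⟩
        · exact Or.inr ⟨m', by simp [hm'], h1, h2⟩
      · rintro (⟨h1, h2⟩ | ⟨m', hm', h1, h2⟩)
        · exact Or.inl ⟨h1, h2⟩
        · rcases List.mem_cons.mp hm' with rfl | hm''
          · exact Or.inr (Or.inl ⟨h1, h2⟩)
          · exact Or.inr (Or.inr ⟨m', hm'', h1, h2⟩)

theorem pvFlat_lb (ivs : List (Int × Int)) : ∀ (lo : Int),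
    (∀ iv ∈ ivs, iv.1 ≤ iv.2) →
    List.IsChain (fun a b => a.2 < b.1) ivs → (∀ iv0 ∈ ivs.head?, lo ≤ iv0.1) →
    ∀ b ∈ ivs.flatMap pvRng, lo ≤ b := by
  induction ivs with
  | nil => intro lo _ _ _ b hb; simp at hb
  | cons iv tl ih =>
    intro lo hle hch hlo b hb
    have hlo0 : lo ≤ iv.1 := hlo iv (by simp)
    have hle0 : iv.1 ≤ iv.2 := hle iv (by simp)
    rw [List.flatMap_cons] at hb
    rcases List.mem_append.mp hb with h | h
    · have := (PySem.List.mem_pyRange_one.mp h).1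
      omega
    · have hch' := List.isChain_cons.mp hch
      refine ih lo (fun x hx => hle x (by simp [hx])) hch'.2 ?_ b h
      intro y hy
      have := hch'.1 y hy
      omega

theorem pvFlat_pairwise (ivs : List (Int × Int)) :
    (∀ iv ∈ ivs, iv.1 ≤ iv.2) →
    List.IsChain (fun a b => a.2 < b.1) ivs →
    List.Pairwise (· < ·) (ivs.flatMap pvRng) := by
  induction ivs with
  | nil => intro _ _; simp
  | cons iv tl ih =>
    intro hle hch
    have hch' := List.isChain_cons.mp hch
    rw [List.flatMap_cons]
    refine List.pairwise_append.mpr ⟨?_, ih (fun x hx => hle x (by simp [hx])) hch'.2, ?_⟩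
    · exact PySem.List.pairwise_lt_pyRange_one iv.1 iv.2
    · intro a ha b hb
      have ha2 : a < iv.2 := (PySem.List.mem_pyRange_one.mp ha).2
      have hb2 : iv.2 ≤ b := by
        refine pvFlat_lb tl iv.2 (fun x hx => hle x (by simp [hx])) hch'.2 ?_ b hb
        intro y hy
        have := hch'.1 y hy
        omega
      omega

theorem pvScan_tail (lines : List String) (k : Nat) : ∀ (s : Int) (acc : List String),
    (PySem.List.pyRange s (s + k) 1).foldl (pvScanStep lines) (acc, some (s - 1))
      = (acc ++ (PySem.List.pyRange s (s + k) 1).map (fun i => PySem.List.pyGetD lines i ""), some (s + k - 1)) := by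
  induction k with
  | zero =>
    intro s acc
    rw [show s + ((0 : Nat) : Int) = s by simp, PySem.List.pyRange_one_eq_nil (le_refl s)]
    simp
  | succ k ih =>
    intro s acc
    have h1 : s < s + ((k + 1 : Nat) : Int) := by push_cast; omega
    rw [PySem.List.pyRange_one_cons h1]
    simp only [List.foldl_cons]
    have hstep : pvScanStep lines (acc, some (s - 1)) s
        = (acc ++ [PySem.List.pyGetD lines s ""], some s) := by
      simp [pvScanStep]
    rw [hstep]
    have h2 : s + ((k + 1 : Nat) : Int) = (s + 1) + (k : Int) := by push_cast; ring
    have ih' := ih (s + 1) (acc ++ [PySem.List.pyGetD lines s ""])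
    rw [show (s + 1 : Int) - 1 = s by ring] at ih'
    rw [h2, ih']
    refine Prod.ext ?_ ?_ <;> simp

theorem pvScan_one (lines : List String) (iv : Int × Int) (acc : List String) (p : Int)
    (h : iv.1 < iv.2) (hp : p + 1 < iv.1) :
    (pvRng iv).foldl (pvScanStep lines) (acc, some p)
      = (acc ++ "..." :: (pvRng iv).map (fun i => PySem.List.pyGetD lines i ""), some (iv.2 - 1)) := by
  unfold pvRng
  rw [PySem.List.pyRange_one_cons h]
  simp only [List.foldl_cons]
  have hstep : pvScanStep lines (acc, some p) iv.1
      = (acc ++ ["..."] ++ [PySem.List.pyGetD lines iv.1 ""], some iv.1) := by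
    simp [pvScanStep, show iv.1 ≠ p + 1 by omega]
  rw [hstep]
  have htail := pvScan_tail lines (iv.2 - iv.1 - 1).toNat (iv.1 + 1)
      (acc ++ ["..."] ++ [PySem.List.pyGetD lines iv.1 ""])
  rw [show (iv.1 + 1) + ((iv.2 - iv.1 - 1).toNat : Int) = iv.2 by omega,
      show iv.1 + 1 - 1 = iv.1 by ring] at htail
  rw [htail]
  refine Prod.ext ?_ ?_ <;> simp

theorem pvScan_first (lines : List String) (iv : Int × Int) (acc : List String) (h : iv.1 < iv.2) :
    (pvRng iv).foldl (pvScanStep lines) (acc, none)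
      = (acc ++ (pvRng iv).map (fun i => PySem.List.pyGetD lines i ""), some (iv.2 - 1)) := by
  unfold pvRng
  rw [PySem.List.pyRange_one_cons h]
  simp only [List.foldl_cons]
  have hstep : pvScanStep lines (acc, none) iv.1
      = (acc ++ [PySem.List.pyGetD lines iv.1 ""], some iv.1) := by
    simp [pvScanStep]
  rw [hstep]
  have htail := pvScan_tail lines (iv.2 - iv.1 - 1).toNat (iv.1 + 1)
      (acc ++ [PySem.List.pyGetD lines iv.1 ""])
  rw [show (iv.1 + 1) + ((iv.2 - iv.1 - 1).toNat : Int) = iv.2 by omega,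
      show iv.1 + 1 - 1 = iv.1 by ring] at htail
  rw [htail]
  refine Prod.ext ?_ ?_ <;> simp

theorem pvScan_blocks (lines : List String) (ivs : List (Int × Int)) : ∀ (h : ivs ≠ []) (acc : List String) (p : Int),
    (∀ iv ∈ ivs, iv.1 < iv.2) → List.IsChain (fun a b => a.2 < b.1) ivs →
    (∀ iv0 ∈ ivs.head?, p + 1 < iv0.1) →
    (ivs.flatMap pvRng).foldl (pvScanStep lines) (acc, some p)
      = (acc ++ ivs.flatMap (fun iv => "..." :: (pvRng iv).map (fun i => PySem.List.pyGetD lines i "")),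
         some ((ivs.getLast h).2 - 1)) := by
  induction ivs with
  | nil => intro h; exact absurd rfl h
  | cons iv tl ih =>
    intro _ acc p hne hch hhd
    have hiv : iv.1 < iv.2 := hne iv (by simp)
    have hp : p + 1 < iv.1 := hhd iv (by simp)
    cases tl with
    | nil =>
      simp only [List.flatMap_cons, List.flatMap_nil, List.append_nil]
      rw [pvScan_one lines iv acc p hiv hp]
      simp
    | cons iv' tl' =>
      have hch' := List.isChain_cons.mp hch
      rw [show ((iv :: iv' :: tl').flatMap pvRng) = pvRng iv ++ (iv' :: tl').flatMap pvRng from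
        List.flatMap_cons .., List.foldl_append, pvScan_one lines iv acc p hiv hp]
      rw [ih (by simp) _ (iv.2 - 1) (fun x hx => hne x (by simp [hx])) hch'.2
        (fun y hy => by
          simp only [List.head?_cons, Option.mem_def, Option.some.injEq] at hy
          subst hy
          have := hch'.1 iv' (by simp)
          omega)]
      rw [show (iv :: iv' :: tl').getLast (by simp) = (iv' :: tl').getLast (by simp) from
        List.getLast_cons _]
      simp [List.flatMap_cons]

theorem pvSlice_eq (lines : List String) (s e : Int) (h0 : 0 ≤ s) (hse : s ≤ e) (hen : e ≤ (lines.length : Int)) :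
    PySem.List.slice lines (some s) (some e)
      = (PySem.List.pyRange s e 1).map (fun i => PySem.List.pyGetD lines i "") := by
  rw [PySem.List.slice_toNat lines h0 (by omega), PySem.List.pyRange_one, List.map_map]
  refine List.ext_getElem ?_ ?_
  · simp
    omega
  · intro i h1 h2
    simp only [List.getElem_take, List.getElem_drop, Function.comp_apply, List.getElem_map,
      List.getElem_range]
    rw [show s + (i : Int) = ((s.toNat + i : Nat) : Int) by omega, PySem.List.pyGetD_natCast,
      List.getD_eq_getElem lines "" (by simp at h1; omega)]

theorem pvRender_fold (lines : List String) (ivs : List (Int × Int)) : ∀ (acc : List String), acc ≠ [] →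
    ivs.foldl (pvRenderIv lines) acc
      = acc ++ ivs.flatMap (fun iv => "..." :: PySem.List.slice lines (some iv.1) (some iv.2)) := by
  induction ivs with
  | nil => intro acc _; simp
  | cons iv tl ih =>
    intro acc hacc
    simp only [List.foldl_cons]
    have hstep : pvRenderIv lines acc iv
        = acc ++ ("..." :: PySem.List.slice lines (some iv.1) (some iv.2)) := by
      simp [pvRenderIv, hacc]
    rw [hstep, ih _ (by simp [hacc])]
    simp [List.flatMap_cons]

theorem pvKeep_mem {β : Type} (l : List β) (cond : β → Bool) (r : β → List Int) :
    ∀ (s0 : PySem.Set Int) (x : Int),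
    (x ∈ l.foldl (fun s p => if cond p then PySem.Set.update s (r p) else s) s0) ↔
      x ∈ s0 ∨ ∃ p ∈ l, cond p = true ∧ x ∈ r p := by
  induction l with
  | nil => intro s0 x; simp
  | cons q l ih =>
    intro s0 x
    simp only [List.foldl_cons]
    rw [ih]
    by_cases hq : cond q = true
    · simp only [hq, if_true, PySem.Set.mem_update, List.mem_cons]
      constructor
      · rintro ((h | h) | ⟨p, hp, h1, h2⟩)
        · exact Or.inl h
        · exact Or.inr ⟨q, Or.inl rfl, hq, h⟩
        · exact Or.inr ⟨p, Or.inr hp, h1, h2⟩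
      · rintro (h | ⟨p, (rfl | hp), h1, h2⟩)
        · exact Or.inl (Or.inl h)
        · exact Or.inl (Or.inr h2)
        · exact Or.inr ⟨p, hp, h1, h2⟩
    · simp only [hq, List.mem_cons]
      constructor
      · rintro (h | ⟨p, hp, h1, h2⟩)
        · exact Or.inl h
        · exact Or.inr ⟨p, Or.inr hp, h1, h2⟩
      · rintro (h | ⟨p, (rfl | hp), h1, h2⟩)
        · exact Or.inl h
        · exact absurd h1 hq
        · exact Or.inr ⟨p, hp, h1, h2⟩

theorem pvKeep_nodup {β : Type} (l : List β) (cond : β → Bool) (r : β → List Int) :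
    ∀ (s0 : PySem.Set Int), s0.Nodup →
    (l.foldl (fun s p => if cond p then PySem.Set.update s (r p) else s) s0).Nodup := by
  induction l with
  | nil => intro s0 h; exact h
  | cons q l ih =>
    intro s0 h
    simp only [List.foldl_cons]
    refine ih _ ?_
    by_cases hq : cond q = true
    · simp only [hq, if_true]
      exact PySem.Set.nodup_update s0 (r q) h
    · simpa [hq] using h

theorem pvMain (content search_term : String) (cl : Int) (ht : search_term ≠ "") (hcl : 0 ≤ cl) :
    find_context_lines content search_term cl = find_context_lines_alt content search_term cl := by
  simp only [find_context_lines, find_context_lines_alt, if_neg ht, PySem.List.len_eq]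
  set lines := (PySem.Str.split? content "\n").getD [] with hlines
  rw [PySem.List.foldl_append_if
    (fun p : Int × String => PySem.Str.isIn (PySem.Str.lower search_term) (PySem.Str.lower p.2))
    (fun p : Int × String => (max 0 (p.1 - cl), min ((lines.length : Int)) (p.1 + cl + 1), p.1))
    (PySem.List.enumerate lines 0) []]
  simp only [List.nil_append]
  rw [show (fun (st : List String × Option Int) (i : Int) =>
      let out := match st.2 with
        | some p => if i ≠ p + 1 then st.1 ++ ["..."] else st.1
        | none => st.1
      (out ++ [PySem.List.pyGetD lines i ""], some i)) = pvScanStep lines from rfl]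
  generalize hK : ((PySem.List.enumerate lines 0).foldl (fun s p =>
      if PySem.Str.isIn (PySem.Str.lower search_term) (PySem.Str.lower p.2) then
        PySem.Set.update s (PySem.List.pyRange (max 0 (p.1 - cl))
          (min ((lines.length : Int)) (p.1 + cl + 1)) 1)
      else s) PySem.Set.empty) = K
  have hKmem : ∀ x : Int, x ∈ K ↔ ∃ p ∈ PySem.List.enumerate lines 0,
      PySem.Str.isIn (PySem.Str.lower search_term) (PySem.Str.lower p.2) = true ∧
        x ∈ PySem.List.pyRange (max 0 (p.1 - cl)) (min ((lines.length : Int)) (p.1 + cl + 1)) 1 := by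
    intro x
    rw [← hK, pvKeep_mem]
    simp [PySem.Set.empty]
  have hKnodup : K.Nodup := by
    rw [← hK]
    exact pvKeep_nodup _ _ _ _ (by simp [PySem.Set.empty])
  cases hE : List.filter (fun p : Int × String =>
      PySem.Str.isIn (PySem.Str.lower search_term) (PySem.Str.lower p.2))
      (PySem.List.enumerate lines 0) with
  | nil =>
    have hnone : ∀ p ∈ PySem.List.enumerate lines 0,
        ¬ PySem.Str.isIn (PySem.Str.lower search_term) (PySem.Str.lower p.2) = true :=
      List.filter_eq_nil_iff.mp hE
    have hKnil : K = [] := by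
      refine List.eq_nil_iff_forall_not_mem.mpr (fun x hx => ?_)
      obtain ⟨p, hp, hc, -⟩ := (hKmem x).mp hx
      exact hnone p hp hc
    rw [if_neg (by simp), if_pos hKnil]
  | cons p1 Erest =>
    have hEmem : ∀ p ∈ p1 :: Erest, p ∈ PySem.List.enumerate lines 0 ∧
        PySem.Str.isIn (PySem.Str.lower search_term) (PySem.Str.lower p.2) = true := by
      intro p hp
      rw [← hE] at hp
      exact ⟨(List.mem_filter.mp hp).1, (List.mem_filter.mp hp).2⟩
    have hpwE : List.Pairwise (fun a b : Int × String => a.1 < b.1) (p1 :: Erest) := by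
      rw [← hE]
      exact (PySem.List.pairwise_lt_enumerate lines 0).filter _
    have hpwM : List.Pairwise (· < ·) (p1.1 :: Erest.map (fun p : Int × String => p.1)) := by
      have := (List.pairwise_map (f := fun p : Int × String => p.1)
        (R := (· < ·)) (l := p1 :: Erest)).mpr hpwE
      simpa using this
    have hbM : ∀ m ∈ p1.1 :: Erest.map (fun p : Int × String => p.1),
        0 ≤ m ∧ m < (lines.length : Int) := by
      intro m hm
      have hex : ∃ p ∈ p1 :: Erest, p.1 = m := by
        rcases List.mem_cons.mp hm with rfl | hm'
        · exact ⟨p1, by simp, rfl⟩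
        · obtain ⟨p, hp, rfl⟩ := List.mem_map.mp hm'
          exact ⟨p, by simp [hp], rfl⟩
      obtain ⟨p, hp, rfl⟩ := hex
      obtain ⟨k, hk, rfl⟩ := (PySem.List.mem_enumerate_iff lines 0 p).mp (hEmem p hp).1
      simp
      omega
    have hm1b := hbM p1.1 (by simp)
    have hrestb : ∀ m ∈ Erest.map (fun p : Int × String => p.1), m < (lines.length : Int) :=
      fun m hm => (hbM m (by simp [hm])).2
    have hrest1 : ∀ m ∈ Erest.map (fun p : Int × String => p.1), p1.1 < m :=
      (List.pairwise_cons.mp hpwM).1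
    have hS : ∀ m ∈ Erest.map (fun p : Int × String => p.1),
        max 0 (p1.1 - cl) ≤ max 0 (m - cl) :=
      fun m hm => by have := hrest1 m hm; omega
    have hbnd := pvIvGo_bounds (lines.length : Int) cl (Erest.map (fun p : Int × String => p.1))
      (max 0 (p1.1 - cl)) p1.1 hcl (le_max_left _ _) (by omega) hm1b.2 hpwM hrestb
    have hchain := pvIvGo_chain (lines.length : Int) cl (Erest.map (fun p : Int × String => p.1))
      (max 0 (p1.1 - cl)) p1.1
    have hmemiv := pvIvGo_mem (lines.length : Int) cl (Erest.map (fun p : Int × String => p.1))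
      (max 0 (p1.1 - cl)) p1.1
    -- A side
    rw [if_pos (by simp : ¬ List.map (fun p : Int × String =>
        (max 0 (p.1 - cl), min ((lines.length : Int)) (p.1 + cl + 1), p.1)) (p1 :: Erest) = [])]
    rw [PySem.List.sorted_eq_self_of_pairwise _ _ (by
      refine List.pairwise_map.mpr ?_
      exact hpwE.imp (fun h => by simp only; omega))]
    rw [PySem.List.slice_from_one]
    simp only [List.map_cons, List.tail_cons, PySem.List.pyGetD_zero_cons]
    rw [show (fun (ms : List (Int × Int × Int)) (t : Int × Int × Int) =>
        let prev := PySem.List.pyGetD ms (-1) (0, 0, 0)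
        if t.1 ≤ prev.2.1 then
          PySem.List.pySetD ms (-1) (prev.1, max t.2.1 prev.2.1, t.2.2)
        else ms ++ [t]) = pvMergeStep from rfl]
    rw [show List.map (fun p : Int × String =>
        (max 0 (p.1 - cl), min ((lines.length : Int)) (p.1 + cl + 1), p.1)) Erest
      = (Erest.map (fun p : Int × String => p.1)).map (fun m : Int =>
        (max 0 (m - cl), min ((lines.length : Int)) (m + cl + 1), m)) from by
      rw [List.map_map]; rfl]
    have hmerge := pvMerge_proj (lines.length : Int) cl (Erest.map (fun p : Int × String => p.1))
      [] (max 0 (p1.1 - cl)) p1.1 p1.1 hpwM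
    simp only [List.nil_append, List.map_nil] at hmerge
    generalize hM : (((Erest.map (fun p : Int × String => p.1)).map (fun m : Int =>
        (max 0 (m - cl), min ((lines.length : Int)) (m + cl + 1), m))).foldl pvMergeStep
        [(max 0 (p1.1 - cl), min ((lines.length : Int)) (p1.1 + cl + 1), p1.1)]) = M
    rw [hM] at hmerge
    obtain ⟨e0, tl, hivs⟩ := pvIvGo_head (lines.length : Int) cl
      (Erest.map (fun p : Int × String => p.1)) (max 0 (p1.1 - cl)) p1.1
    rw [hivs] at hmerge hbnd hchain
    have hb0 : 0 ≤ max 0 (p1.1 - cl) ∧ max 0 (p1.1 - cl) < e0 ∧ e0 ≤ (lines.length : Int) :=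
      hbnd (max 0 (p1.1 - cl), e0) (by simp)
    cases M with
    | nil => simp at hmerge
    | cons t0 M' =>
      simp only [List.map_cons, List.cons.injEq] at hmerge
      obtain ⟨ht0, hM'⟩ := hmerge
      simp only [List.foldl_cons]
      rw [show ((if ([] : List String) ≠ [] then ([] : List String) ++ ["..."] else ([] : List String)) ++
            PySem.List.slice lines (some t0.1) (some t0.2.1))
        = PySem.List.slice lines (some t0.1) (some t0.2.1) from by simp]
      rw [show List.foldl (fun (rl : List String) (t : Int × Int × Int) =>
          (if rl ≠ [] then rl ++ ["..."] else rl) ++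
            PySem.List.slice lines (some t.1) (some t.2.1))
          (PySem.List.slice lines (some t0.1) (some t0.2.1)) M'
        = List.foldl (pvRenderIv lines) (PySem.List.slice lines (some t0.1) (some t0.2.1))
          (M'.map (fun t : Int × Int × Int => (t.1, t.2.1))) from
        (List.foldl_map (f := fun t : Int × Int × Int => (t.1, t.2.1)) (g := pvRenderIv lines)
          (l := M') (init := PySem.List.slice lines (some t0.1) (some t0.2.1))).symm]
      rw [hM']
      have ht01 : t0.1 = max 0 (p1.1 - cl) := by
        have := congrArg Prod.fst ht0; simpa using this
      have ht02 : t0.2.1 = e0 := by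
        have := congrArg Prod.snd ht0; simpa using this
      rw [ht01, ht02]
      have hslice0 : PySem.List.slice lines (some (max 0 (p1.1 - cl))) (some e0)
          = (pvRng (max 0 (p1.1 - cl), e0)).map (fun i => PySem.List.pyGetD lines i "") := by
        exact pvSlice_eq lines _ _ hb0.1 (by omega) hb0.2.2
      have hslice0ne : PySem.List.slice lines (some (max 0 (p1.1 - cl))) (some e0) ≠ [] := by
        rw [hslice0]
        unfold pvRng
        rw [PySem.List.pyRange_one_cons (by exact hb0.2.1)]
        simp
      rw [pvRender_fold lines tl _ hslice0ne]
      -- B side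
      have hcover : ∀ x : Int, x ∈ K ↔
          ((max 0 (p1.1 - cl) ≤ x ∧ x < min ((lines.length : Int)) (p1.1 + cl + 1)) ∨
            ∃ m ∈ Erest.map (fun p : Int × String => p.1),
              max 0 (m - cl) ≤ x ∧ x < min ((lines.length : Int)) (m + cl + 1)) := by
        intro x
        rw [hKmem x]
        constructor
        · rintro ⟨p, hp, hc, hx⟩
          have hpE : p ∈ p1 :: Erest := by
            rw [← hE]
            exact List.mem_filter.mpr ⟨hp, hc⟩
          have hx' := PySem.List.mem_pyRange_one.mp hx
          rcases List.mem_cons.mp hpE with rfl | hp'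
          · exact Or.inl hx'
          · exact Or.inr ⟨p.1, List.mem_map.mpr ⟨p, hp', rfl⟩, hx'.1, hx'.2⟩
        · rintro (⟨hx1, hx2⟩ | ⟨m, hm, hx1, hx2⟩)
          · exact ⟨p1, (hEmem p1 (by simp)).1, (hEmem p1 (by simp)).2,
              PySem.List.mem_pyRange_one.mpr ⟨hx1, hx2⟩⟩
          · obtain ⟨p, hp, rfl⟩ := List.mem_map.mp hm
            exact ⟨p, (hEmem p (by simp [hp])).1, (hEmem p (by simp [hp])).2,
              PySem.List.mem_pyRange_one.mpr ⟨hx1, hx2⟩⟩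
      have hKne : ¬ K = [] := by
        refine List.ne_nil_of_mem (a := p1.1) ?_
        refine (hcover p1.1).mpr (Or.inl ⟨by omega, by omega⟩)
      rw [if_neg hKne]
      have hle : ∀ iv ∈ (max 0 (p1.1 - cl), e0) :: tl, iv.1 ≤ iv.2 :=
        fun iv hiv => le_of_lt (hbnd iv hiv).2.1
      have hflatpw := pvFlat_pairwise _ hle hchain
      have hsorted : PySem.List.sorted K (fun x => x) false
          = ((max 0 (p1.1 - cl), e0) :: tl).flatMap pvRng := by
        refine PySem.List.sorted_eq_of_perm_of_pairwise_lt _ _ _ ?_ hflatpw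
        refine (List.perm_ext_iff_of_nodup (hflatpw.imp (fun h => ne_of_lt h)) hKnodup).mpr ?_
        intro x
        rw [hcover x]
        rw [show (x ∈ ((max 0 (p1.1 - cl), e0) :: tl).flatMap pvRng) ↔
            (∃ iv ∈ (max 0 (p1.1 - cl), e0) :: tl, iv.1 ≤ x ∧ x < iv.2) from by
          rw [List.mem_flatMap]
          exact exists_congr (fun iv => and_congr_right (fun _ => PySem.List.mem_pyRange_one))]
        rw [← hivs]
        exact hmemiv x hcl (le_max_left _ _) (by omega) hm1b.2 hpwM hrestb hS
      rw [hsorted, List.flatMap_cons, List.foldl_append]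
      rw [pvScan_first lines (max 0 (p1.1 - cl), e0) [] hb0.2.1]
      simp only [List.nil_append]
      cases tl with
      | nil =>
        simp only [List.flatMap_nil, List.foldl_nil, List.append_nil]
        rw [hslice0]
      | cons iv1 tl' =>
        have hch' := List.isChain_cons.mp hchain
        rw [pvScan_blocks lines (iv1 :: tl') (by simp) _ (e0 - 1)
          (fun iv hiv => (hbnd iv (by simp [hiv])).2.1) hch'.2
          (fun y hy => by
            simp only [List.head?_cons, Option.mem_def, Option.some.injEq] at hy
            subst hy
            have := hch'.1 iv1 (by simp)
            simp only at this
            omega)]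
        simp only
        congr 1
        rw [hslice0]
        congr 1
        refine List.flatMap_congr ?_
        intro iv hiv
        have hb := hbnd iv (by simp [hiv])
        rw [pvSlice_eq lines iv.1 iv.2 hb.1 (le_of_lt hb.2.1) hb.2.2]
        rfl

theorem pvNoMatch (content search_term : String) (cl : Int) (ht : search_term ≠ "")
    (h : ∀ line ∈ (PySem.Str.split? content "\n").getD [],
      PySem.Str.isIn (PySem.Str.lower search_term) (PySem.Str.lower line) = false) :
    find_context_lines content search_term cl = content ∧
      find_context_lines_alt content search_term cl = content := by
  simp only [find_context_lines, find_context_lines_alt, if_neg ht, PySem.List.len_eq]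
  set lines := (PySem.Str.split? content "\n").getD [] with hlines
  have hnone : ∀ p ∈ PySem.List.enumerate lines 0,
      PySem.Str.isIn (PySem.Str.lower search_term) (PySem.Str.lower p.2) = false := by
    intro p hp
    obtain ⟨k, hk, rfl⟩ := (PySem.List.mem_enumerate_iff lines 0 p).mp hp
    exact h lines[k] (List.getElem_mem hk)
  constructor
  · rw [PySem.List.foldl_append_if
      (fun p : Int × String => PySem.Str.isIn (PySem.Str.lower search_term) (PySem.Str.lower p.2))
      (fun p : Int × String => (max 0 (p.1 - cl), min ((lines.length : Int)) (p.1 + cl + 1), p.1))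
      (PySem.List.enumerate lines 0) []]
    rw [List.filter_eq_nil_iff.mpr
      (fun p hp => by simp only [hnone p hp, Bool.false_eq_true, not_false_eq_true])]
    simp
  · rw [show ((PySem.List.enumerate lines 0).foldl (fun s p =>
        if PySem.Str.isIn (PySem.Str.lower search_term) (PySem.Str.lower p.2) then
          PySem.Set.update s (PySem.List.pyRange (max 0 (p.1 - cl))
            (min ((lines.length : Int)) (p.1 + cl + 1)) 1)
        else s) PySem.Set.empty) = [] from ?_]
    · simp
    · refine List.eq_nil_iff_forall_not_mem.mpr ?_
      intro x hx
      rcases (pvKeep_mem (PySem.List.enumerate lines 0)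
          (fun p => PySem.Str.isIn (PySem.Str.lower search_term) (PySem.Str.lower p.2))
          (fun p => PySem.List.pyRange (max 0 (p.1 - cl)) (min ((lines.length : Int)) (p.1 + cl + 1)) 1)
          PySem.Set.empty x).mp hx with hh | ⟨p, hp, hc, -⟩
      · simp [PySem.Set.empty] at hh
      · rw [hnone p hp] at hc
        exact Bool.false_ne_true hc

-- ===== VERDICT (by name: the statement is the Claim_ definition above) =====
theorem find_context_lines_spec : Claim_equal_find_context_lines := by
  intro content search_term context_lines _ hpre
  by_cases ht : search_term = ""
  · subst ht; rfl
  · rcases hpre with hcl | ht' | hnm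
    · exact pvMain content search_term context_lines ht hcl
    · exact absurd ht' ht
    · exact (pvNoMatch content search_term context_lines ht hnm).1.trans
        (pvNoMatch content search_term context_lines ht hnm).2.symm
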